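-- pv_equiv track=rewrite | github.com/WBennett003/Enzyme-Generator | dataset.py | process_html_equation
-- ===== SOURCE A (Python) =====
-- def process_html_equation(html_equation, equation):
--     chebi_equation = ''
--
--     half_split = equation.split(' = ')
--     reactants = half_split[0].split(' + ')
--     products = half_split[1].split(' + ')
--     n_reactants = len(reactants)
--     n_products = len(products)
--
--     splices = html_equation.split('molid=\"chebi:')
--     reactant_ids = []
--     product_ids = []
--
--     for i, cut in enumerate(splices[1:]):
--         idx = cut.index('"') #the first char after the id is / but this causes an error so i will -1 from the position of "
--         id = cut[:idx]
--
--         if i == n_reactants - 1: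
--             chebi_equation += id + ' = '
--         elif i == len(splices) - 2:
--             chebi_equation += id
--         else:
--             chebi_equation += id + ' + '
--
--
--         if i < n_reactants:
--             reactant_ids.append(id)
--         else:
--             product_ids.append(id)
--
--     #convert to string to make sample data tabular
--     # reactant_ids = ' '.join(reactant_ids)
--     # product_ids = ' '.join(product_ids)
--
--
--     return reactant_ids, product_ids, chebi_equation
-- ===== SOURCE B (Python) =====
-- def process_html_equation(html_equation, equation):
--     half_split = equation.split(' = ')
--     reactants = half_split[0].split(' + ')
--     products = half_split[1].split(' + ')
--     n_reactants = len(reactants)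
--
--     splices = html_equation.split('molid="chebi:')
--     ids = [cut[:cut.index('"')] for cut in splices[1:]]
--
--     reactant_ids = ids[:n_reactants]
--     product_ids = ids[n_reactants:]
--
--     if 0 <= n_reactants - 1 < len(ids):
--         chebi_equation = ' + '.join(reactant_ids) + ' = ' + ' + '.join(product_ids)
--     else:
--         chebi_equation = ' + '.join(ids)
--
--     return reactant_ids, product_ids, chebi_equation
-- ===== Notes on version B (the rewrite author's own statement) =====
-- stated objective: simpler
-- what changed: Replaces A's single indexed loop with interleaved conditional string accumulation and two append-lists by a list comprehension extracting all ids at once, list slicing at the reactant boundary, and ' + '.join (with one ' = ' insertion when the boundary falls inside the id list).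
import Mathlib
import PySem

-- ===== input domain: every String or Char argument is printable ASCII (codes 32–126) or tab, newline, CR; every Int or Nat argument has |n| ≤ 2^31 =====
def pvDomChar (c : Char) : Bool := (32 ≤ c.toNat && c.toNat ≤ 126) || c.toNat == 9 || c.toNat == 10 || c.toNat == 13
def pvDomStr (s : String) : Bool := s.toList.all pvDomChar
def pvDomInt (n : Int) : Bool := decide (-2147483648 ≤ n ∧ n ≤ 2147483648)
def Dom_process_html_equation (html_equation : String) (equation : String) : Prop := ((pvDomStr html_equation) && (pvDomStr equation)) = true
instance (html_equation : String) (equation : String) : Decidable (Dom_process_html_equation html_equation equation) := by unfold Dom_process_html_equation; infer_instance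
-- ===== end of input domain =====

-- B is the same extraction written as a comprehension + slicing + joins instead of A's indexed loop
-- that interleaves string accumulation with two conditional appends (objective: simpler).

-- ===== PORT A =====
-- A-side helper: the body of A's for-loop (state = (reactant_ids, product_ids, chebi_equation)).
def pvStepA (n_reactants : Int) (n_splices : Int)
    (st : List String × List String × String) (p : Int × String) :
    List String × List String × String :=
  let idx := PySem.Str.find p.2 "\""
  let id := PySem.Str.slice p.2 none (some idx)
  let ce :=
    if p.1 = n_reactants - 1 then st.2.2 ++ (id ++ " = ")
    else if p.1 = n_splices - 2 then st.2.2 ++ id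
    else st.2.2 ++ (id ++ " + ")
  if p.1 < n_reactants then (st.1 ++ [id], st.2.1, ce) else (st.1, st.2.1 ++ [id], ce)

def process_html_equation (html_equation : String) (equation : String) :
    List String × List String × String :=
  let half_split := (PySem.Str.split? equation " = ").getD []
  let reactants := (PySem.Str.split? ((PySem.List.pyGet? half_split 0).getD "") " + ").getD []
  let products := (PySem.Str.split? ((PySem.List.pyGet? half_split 1).getD "") " + ").getD []
  let n_reactants : Int := reactants.length
  let _n_products : Int := products.length
  let splices := (PySem.Str.split? html_equation "molid=\"chebi:").getD []
  (PySem.List.enumerate (PySem.List.slice splices (some 1) none) 0).foldl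
    (pvStepA n_reactants (splices.length : Int)) ([], [], "")

-- ===== PORT B =====
def process_html_equation_alt (html_equation : String) (equation : String) :
    List String × List String × String :=
  let half_split := (PySem.Str.split? equation " = ").getD []
  let reactants := (PySem.Str.split? ((PySem.List.pyGet? half_split 0).getD "") " + ").getD []
  let _products := (PySem.Str.split? ((PySem.List.pyGet? half_split 1).getD "") " + ").getD []
  let n_reactants : Int := reactants.length
  let splices := (PySem.Str.split? html_equation "molid=\"chebi:").getD []
  let ids := (PySem.List.slice splices (some 1) none).map
    (fun cut => PySem.Str.slice cut none (some (PySem.Str.find cut "\"")))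
  let reactant_ids := PySem.List.slice ids none (some n_reactants)
  let product_ids := PySem.List.slice ids (some n_reactants) none
  let chebi_equation :=
    if 0 ≤ n_reactants - 1 ∧ n_reactants - 1 < (ids.length : Int) then
      PySem.Str.join " + " reactant_ids ++ " = " ++ PySem.Str.join " + " product_ids
    else
      PySem.Str.join " + " ids
  (reactant_ids, product_ids, chebi_equation)

-- ===== PRECONDITION & SPEC =====
-- Pre_ excludes exactly the inputs where the Python A raises: an equation without ' = '
-- (IndexError on half_split[1]) and a splice after a 'molid="chebi:' marker without '"'
-- (ValueError from cut.index('"')).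
def Pre_process_html_equation (html_equation : String) (equation : String) : Prop :=
  2 ≤ ((PySem.Str.split? equation " = ").getD []).length ∧
  ∀ cut ∈ ((PySem.Str.split? html_equation "molid=\"chebi:").getD []).tail,
    PySem.Str.isIn "\"" cut = true
instance (html_equation : String) (equation : String) :
    Decidable (Pre_process_html_equation html_equation equation) := by
  unfold Pre_process_html_equation; infer_instance

def pvWitness_process_html_equation : String × String :=
  ("molid=\"chebi:15377\"/a molid=\"chebi:29985\"/b", "x = y")

def Spec_process_html_equation (html_equation : String) (equation : String)
    (out : List String × List String × String) : Prop :=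
  out = process_html_equation_alt html_equation equation
instance (html_equation : String) (equation : String)
    (out : List String × List String × String) :
    Decidable (Spec_process_html_equation html_equation equation out) := by
  unfold Spec_process_html_equation; infer_instance

-- ===== CLAIM (what is proved, stated in full; the proofs are below) =====
def Claim_equal_process_html_equation : Prop :=
  ∀ (html_equation : String) (equation : String),
    Dom_process_html_equation html_equation equation →
    Pre_process_html_equation html_equation equation →
    Spec_process_html_equation html_equation equation
      (process_html_equation html_equation equation)

-- ===== LEMMAS AND PROOFS =====

-- the id extracted from one splice
def pvExtract (cut : String) : String :=
  PySem.Str.slice cut none (some (PySem.Str.find cut "\""))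

-- the chebi_equation string A's loop emits for the splices `cs` starting at index `s`
def pvEqStr (N M : Int) : Int → List String → String
  | _, [] => ""
  | s, c :: cs =>
    (if s = N - 1 then pvExtract c ++ " = "
     else if s = M - 2 then pvExtract c
     else pvExtract c ++ " + ") ++ pvEqStr N M (s + 1) cs

lemma pvFoldA (N M : Int) (cs : List String) :
    ∀ (s : Int) (r p : List String) (c : String),
      (PySem.List.enumerate cs s).foldl (pvStepA N M) (r, p, c) =
        (r ++ (cs.take (N - s).toNat).map pvExtract,
         p ++ (cs.drop (N - s).toNat).map pvExtract,
         c ++ pvEqStr N M s cs) := by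
  induction cs with
  | nil =>
    intro s r p c
    simp [PySem.List.enumerate, pvEqStr]
  | cons c0 cs ih =>
    intro s r p c
    rw [PySem.List.enumerate_cons, List.foldl_cons, ih]
    by_cases hlt : s < N
    · have htn : (N - s).toNat = (N - (s + 1)).toNat + 1 := by omega
      simp only [pvStepA, if_pos hlt, htn, List.take_succ_cons, List.drop_succ_cons,
        List.map_cons, pvEqStr]
      refine Prod.ext ?_ (Prod.ext ?_ ?_) <;> (try split_ifs) <;>
        simp [pvExtract, String.append_assoc]
    · have h0 : (N - s).toNat = 0 := by omega
      have h1 : (N - (s + 1)).toNat = 0 := by omega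
      simp only [pvStepA, if_neg hlt, h0, h1, List.take_zero, List.drop_zero, pvEqStr]
      refine Prod.ext ?_ (Prod.ext ?_ ?_) <;> (try split_ifs) <;>
        simp [pvExtract, String.append_assoc]

lemma pvJoin_nil (sep : String) : PySem.Str.join sep [] = "" := by
  apply String.toList_inj.mp
  simp [PySem.Str.toList_join, PySem.Chars.join_nil]

lemma pvJoin_singleton (sep x : String) : PySem.Str.join sep [x] = x := by
  apply String.toList_inj.mp
  simp [PySem.Str.toList_join, PySem.Chars.join_singleton]

lemma pvJoin_cons_cons (sep x y : String) (rest : List String) :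
    PySem.Str.join sep (x :: y :: rest) = x ++ sep ++ PySem.Str.join sep (y :: rest) := by
  apply String.toList_inj.mp
  simp [PySem.Str.toList_join, PySem.Chars.join_cons_cons]

lemma pvJoin_cons_ne_nil (sep x : String) (rest : List String) (h : rest ≠ []) :
    PySem.Str.join sep (x :: rest) = x ++ sep ++ PySem.Str.join sep rest := by
  cases rest with
  | nil => exact absurd rfl h
  | cons y r => exact pvJoin_cons_cons sep x y r

lemma pvEqStr_closed (cs : List String) :
    ∀ (s n : Nat),
      pvEqStr (n : Int) ((s : Int) + cs.length + 1) (s : Int) cs =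
        if (s : Int) < (n : Int) ∧ (n : Int) ≤ (s : Int) + cs.length then
          PySem.Str.join " + " ((cs.take (n - s)).map pvExtract) ++ " = " ++
            PySem.Str.join " + " ((cs.drop (n - s)).map pvExtract)
        else
          PySem.Str.join " + " (cs.map pvExtract) := by
  induction cs with
  | nil =>
    intro s n
    rw [if_neg (by simp only [List.length_nil]; push_cast; omega)]
    simp [pvEqStr, pvJoin_nil]
  | cons c0 cs ih =>
    intro s n
    have hM : (s : Int) + (c0 :: cs).length + 1 = (s : Int) + 1 + cs.length + 1 := by
      simp only [List.length_cons]; push_cast; ring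
    have hrec := ih (s + 1) n
    push_cast at hrec
    simp only [pvEqStr, hM]
    by_cases ha : (s : Int) = (n : Int) - 1
    · -- this splice is the last reactant: A emits ' = ' here
      rw [if_pos ha, hrec]
      have hno : ¬ ((s : Int) + 1 < (n : Int) ∧ (n : Int) ≤ (s : Int) + 1 + (cs.length : Int)) := by
        omega
      have hyes : (s : Int) < (n : Int) ∧ (n : Int) ≤ (s : Int) + ((c0 :: cs).length : Int) := by
        simp only [List.length_cons]; push_cast; omega
      rw [if_neg hno, if_pos hyes]
      have htake : n - s = 1 := by omega
      simp only [htake, List.take_succ_cons, List.take_zero, List.drop_succ_cons,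
        List.drop_zero, List.map_cons, List.map_nil, pvJoin_singleton]
    · by_cases hb : (s : Int) = (s : Int) + 1 + (cs.length : Int) + 1 - 2
      · -- last splice (and not the reactant boundary): A emits the bare id
        have hnil : cs = [] := by
          have h0 : (cs.length : Int) = 0 := by omega
          exact List.length_eq_zero_iff.mp (by exact_mod_cast h0)
        subst hnil
        rw [if_neg ha, if_pos hb]
        have hno : ¬ ((s : Int) < (n : Int) ∧ (n : Int) ≤ (s : Int) + ((c0 :: ([] : List String)).length : Int)) := by
          simp only [List.length_cons, List.length_nil]; push_cast; omega
        rw [if_neg hno]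
        simp [pvEqStr, pvJoin_singleton]
      · -- middle splice: A emits ' + '; the remaining list is nonempty
        have hcs : cs ≠ [] := by
          intro hnil
          apply hb
          subst hnil
          simp only [List.length_nil]
          push_cast
          ring
        rw [if_neg ha, if_neg hb, hrec]
        by_cases hc : (s : Int) < (n : Int) ∧ (n : Int) ≤ (s : Int) + ((c0 :: cs).length : Int)
        · have hc2 := hc.2
          simp only [List.length_cons] at hc2
          push_cast at hc2
          have hs1 : (s : Int) + 1 < (n : Int) := by omega
          have hyes : (s : Int) + 1 < (n : Int) ∧ (n : Int) ≤ (s : Int) + 1 + (cs.length : Int) := by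
            exact ⟨hs1, by omega⟩
          rw [if_pos hyes, if_pos hc]
          have htake : n - s = (n - (s + 1)) + 1 := by omega
          have htnil : (cs.take (n - (s + 1))).map pvExtract ≠ [] := by
            have h1 : cs.take (n - (s + 1)) ≠ [] := by
              intro h
              rcases List.take_eq_nil_iff.mp h with h' | h'
              · omega
              · exact hcs h'
            simpa using h1
          rw [htake, List.take_succ_cons, List.drop_succ_cons, List.map_cons,
            pvJoin_cons_ne_nil _ _ _ htnil]
          simp [String.append_assoc]
        · have hnc : ¬ ((s : Int) + 1 < (n : Int) ∧ (n : Int) ≤ (s : Int) + 1 + (cs.length : Int)) := by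
            simp only [List.length_cons] at hc
            push_cast at hc
            omega
          rw [if_neg hnc, if_neg hc]
          simp only [List.map_cons]
          rw [pvJoin_cons_ne_nil _ _ _ (by simpa using hcs)]

lemma pvEqStr_closed_zero (cs : List String) (n : Nat) :
    pvEqStr (n : Int) ((cs.length : Int) + 1) 0 cs =
      if 0 < (n : Int) ∧ (n : Int) ≤ (cs.length : Int) then
        PySem.Str.join " + " ((cs.take n).map pvExtract) ++ " = " ++
          PySem.Str.join " + " ((cs.drop n).map pvExtract)
      else PySem.Str.join " + " (cs.map pvExtract) := by
  simpa using pvEqStr_closed cs 0 n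

-- ===== VERDICT (by name: the statement is the Claim_ definition above) =====
theorem process_html_equation_spec : Claim_equal_process_html_equation := by
  unfold Claim_equal_process_html_equation
  intro html_equation equation _ _
  unfold Spec_process_html_equation process_html_equation process_html_equation_alt
  simp only [PySem.List.slice_from_one]
  set n : Nat :=
    ((PySem.Str.split? ((PySem.List.pyGet? ((PySem.Str.split? equation " = ").getD []) 0).getD "")
      " + ").getD []).length with hn
  cases hsp : (PySem.Str.split? html_equation "molid=\"chebi:").getD [] with
  | nil =>
    simp [PySem.List.slice, PySem.List.clampIdx, pvJoin_nil]
    omega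
  | cons s0 rest =>
    rw [pvFoldA]
    simp only [List.tail_cons, List.length_cons, Nat.cast_add, Nat.cast_one]
    rw [pvEqStr_closed_zero rest n]
    have hN : ((n : Int) - 0).toNat = n := by omega
    rw [hN]
    rw [PySem.List.slice_to_natCast, PySem.List.slice_from_natCast]
    have hids : (rest.map (fun cut => PySem.Str.slice cut none (some (PySem.Str.find cut "\"")))).length
        = rest.length := by simp
    have hmapt : (rest.take n).map pvExtract =
        (rest.map (fun cut => PySem.Str.slice cut none (some (PySem.Str.find cut "\"")))).take n := by
      rw [List.map_take]; rfl
    have hmapd : (rest.drop n).map pvExtract =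
        (rest.map (fun cut => PySem.Str.slice cut none (some (PySem.Str.find cut "\"")))).drop n := by
      rw [List.map_drop]; rfl
    have hmapa : rest.map pvExtract =
        rest.map (fun cut => PySem.Str.slice cut none (some (PySem.Str.find cut "\""))) := rfl
    by_cases hc : (0 : Int) < (n : Int) ∧ (n : Int) ≤ (rest.length : Int)
    · have hc' : 0 ≤ (n : Int) - 1 ∧ (n : Int) - 1 <
          ((rest.map (fun cut => PySem.Str.slice cut none (some (PySem.Str.find cut "\"")))).length : Int) := by
        simp only [hids]; omega
      rw [if_pos hc, if_pos hc']
      simp only [hmapt, hmapd, List.nil_append, String.empty_append]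
    · have hc' : ¬ (0 ≤ (n : Int) - 1 ∧ (n : Int) - 1 <
          ((rest.map (fun cut => PySem.Str.slice cut none (some (PySem.Str.find cut "\"")))).length : Int)) := by
        simp only [hids]; omega
      rw [if_neg hc, if_neg hc']
      simp only [hmapt, hmapd, hmapa, List.nil_append, String.empty_append]
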